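-- pv_equiv track=rewrite | github.com/yammouch/python_lesson | 2080_yoshimura/s0020.py | origins
-- ===== SOURCE A (Python) =====
-- def origins(g):
--   reached = {}
--   for v in g:
--     reached[v] = None
--
--   for v in g:
--     for v2 in g[v]:
--       reached[v2] = 1
--
--   return [v for v in reached if not reached[v]]
-- ===== SOURCE B (Python) =====
-- def origins(g):
--   return [v for v in g if all(v not in g[u] for u in g)]
-- ===== Notes on version B (the rewrite author's own statement) =====
-- stated objective: alternative
-- what changed: B builds no auxiliary structure at all: instead of A's flag dict (one initialization pass, one marking pass, one filter pass), B checks each node directly by scanning every adjacency list for it (nested scan).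
import Mathlib
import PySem

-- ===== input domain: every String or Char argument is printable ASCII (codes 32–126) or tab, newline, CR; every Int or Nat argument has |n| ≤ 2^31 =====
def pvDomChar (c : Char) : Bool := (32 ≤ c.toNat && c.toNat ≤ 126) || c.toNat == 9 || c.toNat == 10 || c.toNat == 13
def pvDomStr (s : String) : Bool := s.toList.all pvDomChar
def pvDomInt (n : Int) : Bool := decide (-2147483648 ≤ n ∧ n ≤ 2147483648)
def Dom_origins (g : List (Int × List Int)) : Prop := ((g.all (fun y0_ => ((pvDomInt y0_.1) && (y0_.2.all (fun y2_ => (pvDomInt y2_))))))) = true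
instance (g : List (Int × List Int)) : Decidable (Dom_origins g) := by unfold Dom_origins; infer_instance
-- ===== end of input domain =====

-- B builds no auxiliary structure: instead of A's flag dict (init pass + marking pass +
-- filter), it tests each key by a direct nested scan of every adjacency list (objective:
-- alternative; B is O(V*E) where A is O(V+E)).
-- The dict g is the association list g (insertion order, unique keys per the convention);
-- 'for v in g: … g[v]' is ported as iteration over the items, 'for v in g' alone as the
-- distinct keys in insertion order.

-- ===== PORT A =====
-- reached[v] = None / reached[v2] = 1: only truthiness of the value is used, modeled as Bool false/true
def origins (g : List (Int × List Int)) : List Int :=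
  let reached : PySem.Dict Int Bool :=
    g.foldl (fun d p => d.insert p.1 false) PySem.Dict.empty
  let reached : PySem.Dict Int Bool :=
    g.foldl (fun d p => p.2.foldl (fun d v2 => d.insert v2 true) d) reached
  -- [v for v in reached if not reached[v]]: dict keys are unique, so reached[v] is the item's value
  (reached.items.filter (fun p => !p.2)).map Prod.fst

-- ===== PORT B =====
-- [v for v in g if all(v not in g[u] for u in g)]: keys in insertion order, each tested
-- against every adjacency list (on a dict the items are exactly the (u, g[u]) pairs)
def origins_alt (g : List (Int × List Int)) : List Int :=
  (PySem.Set.ofList (g.map Prod.fst)).filter (fun v => g.all (fun p => !(p.2.contains v)))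

-- ===== PRECONDITION & SPEC =====
def Spec_origins (g : List (Int × List Int)) (out : List Int) : Prop := out = origins_alt g
instance (g : List (Int × List Int)) (out : List Int) : Decidable (Spec_origins g out) := by unfold Spec_origins; infer_instance

-- ===== CLAIM (what is proved, stated in full; the proofs are below) =====
def Claim_equal_origins : Prop := ∀ (g : List (Int × List Int)), Dom_origins g → Spec_origins g (origins g)

-- ===== LEMMAS AND PROOFS =====

-- a nested loop over the value lists is the loop over the concatenation of the value lists
theorem foldl_inner {α : Type} (f : α → Int → α) :
    ∀ (l : List (Int × List Int)) (a : α),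
      l.foldl (fun a p => p.2.foldl f a) a = (l.flatMap Prod.snd).foldl f a := by
  intro l
  induction l with
  | nil => intro a; rfl
  | cons p t ih => intro a; simp [List.flatMap_cons, List.foldl_append, ih]

-- marking every w ∈ ws as true: the still-false items are the originally false ones whose key is not in ws
theorem filter_false_foldl_insert_true :
    ∀ (ws : List Int) (d : PySem.Dict Int Bool),
      ((ws.foldl (fun d v => d.insert v true) d).items.filter (fun p => !p.2))
        = d.items.filter (fun p => !p.2 && !(ws.contains p.1)) := by
  intro ws
  induction ws with
  | nil =>
      intro d
      simp
  | cons v t ih =>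
      intro d
      rw [List.foldl_cons, ih]
      by_cases hc : d.contains v = true
      · rw [PySem.Dict.items_insert_of_contains _ _ hc]
        induction d.items with
        | nil => rfl
        | cons q l ihl =>
            simp only [List.map_cons, List.filter_cons]
            by_cases hq : q.1 = v
            · simpa [hq] using ihl
            · by_cases h2 : q.2 = true
              · simpa [hq, h2] using ihl
              · by_cases ht : q.1 ∈ t
                · simpa [hq, h2, ht] using ihl
                · simpa [hq, h2, ht] using ihl
      · rw [PySem.Dict.items_insert_of_not_contains _ _ (by simpa using hc)]
        rw [List.filter_append]
        have hnil : ([((v : Int), true)].filter (fun p => !p.2 && !(t.contains p.1))) = [] := by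
          simp
        rw [hnil, List.append_nil]
        apply List.filter_congr
        intro p hp
        have hne : p.1 ≠ v := by
          intro h
          apply hc
          rw [PySem.Dict.contains_iff_mem_keys, ← h]
          exact List.mem_map_of_mem hp
        simp [hne]

-- in the first pass every stored value is false
theorem values_all_false :
    ∀ (g : List (Int × List Int)) (d : PySem.Dict Int Bool),
      (∀ p ∈ d.items, p.2 = false) →
      ∀ p ∈ (g.foldl (fun d p => d.insert p.1 false) d).items, p.2 = false := by
  intro g
  induction g with
  | nil => intro d h; exact h
  | cons q t ih =>
      intro d h
      refine ih _ ?_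
      intro p hp
      rcases (PySem.Dict.mem_items_insert _ _ _ _).1 hp with h1 | h2
      · rw [h1]
      · exact h p h2.1

-- B's nested per-node scan tests exactly membership in the concatenated value lists
theorem all_not_contains_eq (v : Int) :
    ∀ (g : List (Int × List Int)),
      (g.all (fun p => !(p.2.contains v))) = !((g.flatMap Prod.snd).contains v) := by
  intro g
  induction g with
  | nil => rfl
  | cons p t ih =>
      simp only [List.all_cons, List.flatMap_cons]
      simp only [List.contains_eq_mem, List.mem_append] at ih ⊢
      rw [ih]
      by_cases h1 : v ∈ p.2 <;> by_cases h2 : v ∈ List.flatMap Prod.snd t <;> simp [h1, h2]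

-- ===== VERDICT (by name: the statement is the Claim_ definition above) =====
theorem origins_spec : Claim_equal_origins := by
  intro g _
  show origins g = origins_alt g
  unfold origins origins_alt
  simp only [foldl_inner]
  rw [filter_false_foldl_insert_true]
  set ws := g.flatMap Prod.snd with hws
  set d1 := g.foldl (fun d p => d.insert p.1 false) (PySem.Dict.empty : PySem.Dict Int Bool) with hd1
  have hall : ∀ p ∈ d1.items, p.2 = false :=
    values_all_false g PySem.Dict.empty (by intro p hp; simp [PySem.Dict.empty] at hp)
  have hfilter : d1.items.filter (fun p => !p.2 && !(ws.contains p.1))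
      = d1.items.filter (fun p => !(ws.contains p.1)) := by
    apply List.filter_congr
    intro p hp
    rw [hall p hp]
    simp
  rw [hfilter]
  have hkeys : d1.keys = PySem.Set.ofList (g.map Prod.fst) := by
    rw [hd1, PySem.Dict.keys_foldl_insert_key g Prod.fst (fun _ _ => false)]
    simp [PySem.Set.update_nil_left, PySem.Dict.keys_empty]
  have hmapfilter :
      (d1.items.filter (fun p => !(ws.contains p.1))).map Prod.fst
        = (d1.items.map Prod.fst).filter (fun v => !(ws.contains v)) := by
    induction d1.items with
    | nil => rfl
    | cons q l ihl =>
        simp only [List.filter_cons, List.map_cons]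
        by_cases hq : q.1 ∈ ws
        · simpa [hq] using ihl
        · simpa [hq] using ihl
  rw [hmapfilter]
  have hk : d1.items.map Prod.fst = d1.keys := rfl
  rw [hk, hkeys]
  apply List.filter_congr
  intro v _
  rw [all_not_contains_eq v g]
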